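-- pv_equiv track=rewrite | github.com/ChunkyMonkey11/SASEHacks-UCM-2025 | main.py | identify_sections
-- ===== SOURCE A (Python) =====
-- def identify_sections(text):
--     """Identify different sections in the resume."""
--     sections = {}
--     lines = text.split('\n')
--     current_section = None
--
--     # Common section headers in resumes
--     RESUME_SECTIONS = {
--         'experience': ['experience', 'work experience', 'employment', 'work history', 'professional experience'],
--         'education': ['education', 'academic background', 'qualifications', 'academic qualifications'],
--         'skills': ['skills', 'technical skills', 'core competencies', 'expertise', 'technologies'],
--         'projects': ['projects', 'personal projects', 'portfolio', 'technical projects'],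
--         'certifications': ['certifications', 'certificates', 'professional certifications']
--     }
--
--     # Process each line
--     section_content = []
--     for line in lines:
--         line = line.strip().lower()
--         if not line:
--             continue
--
--         # Check if line is a section header
--         found_section = None
--         for section_type, keywords in RESUME_SECTIONS.items():
--             if any(keyword in line for keyword in keywords):
--                 found_section = section_type
--                 break
--
--         if found_section:
--             # Save previous section content
--             if current_section:
--                 sections[current_section] = section_content
--             # Start new section
--             current_section = found_section
--             section_content = []
--         elif current_section:
--             section_content.append(line)
--
--     # Save last section
--     if current_section and section_content:
--         sections[current_section] = section_content
--
--     return sections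
-- ===== SOURCE B (Python) =====
-- RESUME_SECTIONS = {
--     'experience': ['experience', 'work experience', 'employment', 'work history', 'professional experience'],
--     'education': ['education', 'academic background', 'qualifications', 'academic qualifications'],
--     'skills': ['skills', 'technical skills', 'core competencies', 'expertise', 'technologies'],
--     'projects': ['projects', 'personal projects', 'portfolio', 'technical projects'],
--     'certifications': ['certifications', 'certificates', 'professional certifications']
-- }
--
-- FLAT_KEYWORDS = [(sec, kw) for sec, kws in RESUME_SECTIONS.items() for kw in kws]
--
--
-- def identify_sections(text):
--     """Identify different sections in the resume."""
--     lines = [l for l in (raw.strip().lower() for raw in text.split('\n')) if l]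
--     # locate every header line by position
--     heads = []
--     for i, line in enumerate(lines):
--         sec = next((s for s, kw in FLAT_KEYWORDS if kw in line), None)
--         if sec is not None:
--             heads.append((i, sec))
--     # content of each section is the slice between its header and the next one
--     result = {}
--     for (i, sec), (j, _) in zip(heads, heads[1:]):
--         result[sec] = lines[i + 1:j]
--     if heads:
--         i, sec = heads[-1]
--         tail = lines[i + 1:]
--         if tail:
--             result[sec] = tail
--     return result
-- ===== Notes on version B (the rewrite author's own statement) =====
-- stated objective: alternative
-- what changed: Replaces A's single stateful loop (dict + current-section + growing content buffer updated line by line) with a positions-and-slices algorithm: flatten the keyword table, locate all header line indices in one pass, then read each section's content directly as the slice of lines between consecutive header positions (the final header's tail slice stored only when non-empty).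
import Mathlib
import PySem

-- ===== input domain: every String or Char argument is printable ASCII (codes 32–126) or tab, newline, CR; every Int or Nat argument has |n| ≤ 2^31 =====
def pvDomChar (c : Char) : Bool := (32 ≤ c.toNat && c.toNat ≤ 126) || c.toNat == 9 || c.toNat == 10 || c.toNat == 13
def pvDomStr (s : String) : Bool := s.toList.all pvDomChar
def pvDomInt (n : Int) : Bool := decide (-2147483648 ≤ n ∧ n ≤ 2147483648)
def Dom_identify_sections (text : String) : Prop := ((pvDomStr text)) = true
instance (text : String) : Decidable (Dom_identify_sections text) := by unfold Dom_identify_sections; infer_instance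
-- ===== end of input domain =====

-- B replaces A's single stateful loop (dict + current-section + growing content buffer) by a
-- positions-and-slices algorithm: locate all header indices first, then read each section's
-- content as the slice of lines between consecutive headers; objective: alternative.

-- ===== PORT A =====
-- A's section-keyword table
def pvResumeSections : List (String × List String) :=
  [("experience", ["experience", "work experience", "employment", "work history", "professional experience"]),
   ("education", ["education", "academic background", "qualifications", "academic qualifications"]),
   ("skills", ["skills", "technical skills", "core competencies", "expertise", "technologies"]),
   ("projects", ["projects", "personal projects", "portfolio", "technical projects"]),
   ("certifications", ["certifications", "certificates", "professional certifications"])]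

-- A's inner loop: first section whose keyword list has a keyword contained in the line
def pvFoundSection (line : String) : Option String :=
  (pvResumeSections.find? (fun p => p.2.any (fun kw => PySem.Str.isIn kw line))).map (·.1)

-- A's loop body on a normalised non-empty line: on a header save the pending section, else append
def pvCoreA (st : PySem.Dict String (List String) × Option String × List String)
    (line : String) : PySem.Dict String (List String) × Option String × List String :=
  match pvFoundSection line with
  | some found =>
      (match st.2.1 with
       | some cs => st.1.insert cs st.2.2
       | none => st.1, some found, [])
  | none =>
      match st.2.1 with
      | some _ => (st.1, st.2.1, st.2.2 ++ [line])
      | none => st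

-- A's full loop body: strip+lower, skip empties, then the above
def pvStepA (st : PySem.Dict String (List String) × Option String × List String)
    (rawline : String) : PySem.Dict String (List String) × Option String × List String :=
  let line := PySem.Str.lower (PySem.Str.strip rawline)
  if line = "" then st else pvCoreA st line

def identify_sections (text : String) : List (String × List String) :=
  let lines := (PySem.Str.split? text "\n").getD []
  let st := lines.foldl pvStepA ((PySem.Dict.empty : PySem.Dict String (List String)), none, [])
  (match st.2.1 with
   | some cs =>
       match st.2.2 with
       | [] => st.1
       | _ => st.1.insert cs st.2.2
   | none => st.1).items

-- ===== PORT B =====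
-- Source B's own copy of the table and its flattened (section, keyword) list
def pvResumeSectionsB : List (String × List String) :=
  [("experience", ["experience", "work experience", "employment", "work history", "professional experience"]),
   ("education", ["education", "academic background", "qualifications", "academic qualifications"]),
   ("skills", ["skills", "technical skills", "core competencies", "expertise", "technologies"]),
   ("projects", ["projects", "personal projects", "portfolio", "technical projects"]),
   ("certifications", ["certifications", "certificates", "professional certifications"])]

def pvFlatKeywords : List (String × String) :=
  pvResumeSectionsB.flatMap (fun p => p.2.map (fun kw => (p.1, kw)))

-- next((s for s, kw in FLAT_KEYWORDS if kw in line), None)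
def pvClassifyB (line : String) : Option String :=
  (pvFlatKeywords.find? (fun q => PySem.Str.isIn q.2 line)).map (·.1)

def identify_sections_alt (text : String) : List (String × List String) :=
  -- normalised non-empty lines
  let lines := (((PySem.Str.split? text "\n").getD []).map
      (fun raw => PySem.Str.lower (PySem.Str.strip raw))).filter (fun l => l ≠ "")
  -- locate every header line by position
  let heads := (PySem.List.enumerate lines).foldl
      (fun (acc : List (Int × String)) p =>
        match pvClassifyB p.2 with
        | some s => acc ++ [(p.1, s)]
        | none => acc) []
  -- content of a section: the slice between its header and the next one
  let d := (heads.zip (PySem.List.slice heads (some 1) none)).foldl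
      (fun (d : PySem.Dict String (List String)) pq =>
        d.insert pq.1.2 (PySem.List.slice lines (some (pq.1.1 + 1)) (some pq.2.1)))
      PySem.Dict.empty
  -- heads[-1] under the "if heads:" guard is the last element
  match heads.getLast? with
  | none => d.items
  | some (i, sec) =>
      let tail := PySem.List.slice lines (some (i + 1)) none
      if tail.isEmpty then d.items else (d.insert sec tail).items

-- ===== PRECONDITION & SPEC =====
def Spec_identify_sections (text : String) (out : List (String × List String)) : Prop := out = identify_sections_alt text
instance (text : String) (out : List (String × List String)) : Decidable (Spec_identify_sections text out) := by unfold Spec_identify_sections; infer_instance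

-- ===== CLAIM (what is proved, stated in full; the proofs are below) =====
def Claim_equal_identify_sections : Prop := ∀ (text : String), Dom_identify_sections text → Spec_identify_sections text (identify_sections text)

-- ===== LEMMAS AND PROOFS =====

-- non-header test
def pvNH (x : String) : Bool := (pvFoundSection x).isNone

-- the segment decomposition both programs compute: after each header, the run of
-- non-header lines up to the next header
def pvSegs : List String → List (String × List String)
  | [] => []
  | l :: t =>
    match pvFoundSection l with
    | some s => (s, t.takeWhile pvNH) :: pvSegs (t.dropWhile pvNH)
    | none => pvSegs t
termination_by ls => ls.length
decreasing_by
  · simpa using Nat.lt_succ_of_le (t.length_dropWhile_le pvNH)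
  · simp

-- ---------- A-side: fold ⇒ segments ----------

theorem pvFoldA_filter (lines : List String)
    (st : PySem.Dict String (List String) × Option String × List String) :
    lines.foldl pvStepA st =
      ((lines.map (fun raw => PySem.Str.lower (PySem.Str.strip raw))).filter
        (fun l => l ≠ "")).foldl pvCoreA st := by
  induction lines generalizing st with
  | nil => simp only [List.foldl_nil, List.map_nil, List.filter_nil]
  | cons raw rest ih =>
      rw [List.foldl_cons, List.map_cons, List.filter_cons]
      by_cases h : PySem.Str.lower (PySem.Str.strip raw) = ""
      · have h1 : pvStepA st raw = st := by
          simp only [pvStepA]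
          rw [if_pos h]
        rw [h1, ih, if_neg (by simp [h])]
      · have h1 : pvStepA st raw = pvCoreA st (PySem.Str.lower (PySem.Str.strip raw)) := by
          simp only [pvStepA]
          rw [if_neg h]
        rw [h1, ih, if_pos (by simp [h]), List.foldl_cons]

-- reversed-segment-list step (proof-side model of A's state)
def pvStepB (rsegs : List (String × List String)) (line : String) : List (String × List String) :=
  match pvFoundSection line, rsegs with
  | some s, _ => (s, []) :: rsegs
  | none, [] => []
  | none, (s, c) :: rest => (s, c ++ [line]) :: rest

def pvDictOf (l : List (String × List String)) : PySem.Dict String (List String) :=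
  l.foldl (fun (d : PySem.Dict String (List String)) p => d.insert p.1 p.2) PySem.Dict.empty

-- abstraction from the reversed segment list to A's loop state
def pvAbs (rsegs : List (String × List String)) :
    PySem.Dict String (List String) × Option String × List String :=
  match rsegs with
  | [] => ((PySem.Dict.empty : PySem.Dict String (List String)), none, [])
  | (s, c) :: rest => (pvDictOf rest.reverse, some s, c)

theorem pvCommute (rsegs : List (String × List String)) (line : String) :
    pvCoreA (pvAbs rsegs) line = pvAbs (pvStepB rsegs line) := by
  cases h : pvFoundSection line with
  | some s =>
      cases rsegs with
      | nil => simp [pvCoreA, pvStepB, pvAbs, pvDictOf, h]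
      | cons p rest =>
          obtain ⟨cs, c⟩ := p
          simp [pvCoreA, pvStepB, pvAbs, pvDictOf, h, List.foldl_append]
  | none =>
      cases rsegs with
      | nil => simp [pvCoreA, pvStepB, pvAbs, h]
      | cons p rest =>
          obtain ⟨cs, c⟩ := p
          simp [pvCoreA, pvStepB, pvAbs, h]

theorem pvFoldCommute (ls : List String) (rsegs : List (String × List String)) :
    ls.foldl pvCoreA (pvAbs rsegs) = pvAbs (ls.foldl pvStepB rsegs) := by
  induction ls generalizing rsegs with
  | nil => simp only [List.foldl_nil]
  | cons l rest ih =>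
      rw [List.foldl_cons, pvCommute, List.foldl_cons, ih]

-- the reversed-segment fold never drops below its top frame
theorem pvStepB_frame (ls : List String) (x : String × List String)
    (rest : List (String × List String)) :
    ls.foldl pvStepB (x :: rest) = ls.foldl pvStepB [x] ++ rest := by
  induction ls generalizing x rest with
  | nil => simp
  | cons l t ih =>
      cases h : pvFoundSection l with
      | some s =>
          obtain ⟨xs, xc⟩ := x
          simp only [List.foldl_cons, pvStepB, h]
          rw [ih _ (((xs, xc)) :: rest), ih ((s, [])) [(xs, xc)], List.append_assoc]
          simp
      | none =>
          obtain ⟨xs, xc⟩ := x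
          simp only [List.foldl_cons, pvStepB, h]
          exact ih _ _

theorem pvStepB_single (ls : List String) (s : String) (c : List String) :
    (ls.foldl pvStepB [(s, c)]).reverse =
      (s, c ++ ls.takeWhile pvNH) :: pvSegs (ls.dropWhile pvNH) := by
  induction ls generalizing s c with
  | nil => simp [pvSegs]
  | cons l t ih =>
      cases h : pvFoundSection l with
      | some s' =>
          rw [List.foldl_cons]
          have hstep : pvStepB [(s, c)] l = [(s', []), (s, c)] := by
            simp [pvStepB, h]
          rw [hstep, pvStepB_frame t (s', []) [(s, c)], List.reverse_append]
          have hnh : pvNH l = false := by simp [pvNH, h]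
          rw [ih]
          simp [pvSegs, h, hnh]
      | none =>
          rw [List.foldl_cons]
          have hstep : pvStepB [(s, c)] l = [(s, c ++ [l])] := by
            simp [pvStepB, h]
          have hnh : pvNH l = true := by simp [pvNH, h]
          rw [hstep, ih]
          simp [hnh]

theorem pvStepB_segs (ls : List String) :
    (ls.foldl pvStepB []).reverse = pvSegs ls := by
  induction ls with
  | nil => simp [pvSegs]
  | cons l t ih =>
      cases h : pvFoundSection l with
      | some s =>
          rw [List.foldl_cons]
          have hstep : pvStepB [] l = [(s, [])] := by simp [pvStepB, h]
          rw [hstep, pvStepB_single]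
          simp [pvSegs, h]
      | none =>
          rw [List.foldl_cons]
          have hstep : pvStepB [] l = [] := by simp [pvStepB, h]
          rw [hstep, ih]
          simp [pvSegs, h]

-- ---------- B-side: header positions ----------

def pvShift (m : Nat) (hd : List (Nat × String)) : List (Nat × String) :=
  hd.map (fun p => (p.1 + m, p.2))

def pvHeadsN : List String → List (Nat × String)
  | [] => []
  | l :: t =>
    (match pvFoundSection l with
     | some s => [((0 : Nat), s)]
     | none => []) ++ pvShift 1 (pvHeadsN t)

theorem pvFindFlat (tbl : List (String × List String)) (f : String → Bool) :
    ((tbl.flatMap (fun p => p.2.map (fun kw => (p.1, kw)))).find?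
        (fun q => f q.2)).map (·.1)
      = (tbl.find? (fun p => p.2.any f)).map (·.1) := by
  induction tbl with
  | nil => simp
  | cons p rest ih =>
      obtain ⟨s, kws⟩ := p
      rw [List.flatMap_cons, List.find?_append]
      have hmap : ((kws.map (fun kw => (s, kw))).find? (fun q => f q.2))
          = (kws.find? f).map (fun kw => (s, kw)) := by
        rw [List.find?_map]; rfl
      cases hA : kws.any f with
      | true =>
          obtain ⟨kw, hkw⟩ := Option.isSome_iff_exists.mp
            (List.find?_isSome.mpr (List.any_eq_true.mp hA))
          simp [hA, hmap, hkw]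
      | false =>
          have hnone : kws.find? f = none := by
            rw [List.find?_eq_none]
            intro x hx
            exact (List.any_eq_false.mp hA) x hx
          have hcons : List.find? (fun p => p.2.any f) ((s, kws) :: rest)
              = List.find? (fun p => p.2.any f) rest := by
            rw [List.find?_cons_of_neg]
            simp [hA]
          rw [hmap, hnone, hcons]
          simpa using ih

theorem pvClassifyB_eq (line : String) : pvClassifyB line = pvFoundSection line := by
  unfold pvClassifyB pvFoundSection pvFlatKeywords
  rw [show pvResumeSectionsB = pvResumeSections from rfl]
  exact pvFindFlat pvResumeSections (fun kw => PySem.Str.isIn kw line)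

theorem pvHeads_fold (ls : List String) (k : Int) (acc : List (Int × String)) :
    (PySem.List.enumerate ls k).foldl
      (fun (acc : List (Int × String)) p =>
        match pvClassifyB p.2 with
        | some s => acc ++ [(p.1, s)]
        | none => acc) acc
      = acc ++ (pvHeadsN ls).map (fun p => ((k + (p.1 : Int)), p.2)) := by
  induction ls generalizing k acc with
  | nil => simp [pvHeadsN, PySem.List.enumerate_nil]
  | cons l t ih =>
      rw [PySem.List.enumerate_cons, List.foldl_cons]
      cases h : pvFoundSection l with
      | some s =>
          have hc : pvClassifyB l = some s := by rw [pvClassifyB_eq, h]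
          simp only [hc]
          rw [ih]
          simp only [pvHeadsN, h, pvShift, List.map_cons, List.map_map, List.nil_append,
            List.cons_append, List.append_assoc]
          congr 2
          · simp
          · apply List.map_congr_left
            intro p _
            simp only [Function.comp]
            congr 1
            push_cast; ring
      | none =>
          have hc : pvClassifyB l = none := by rw [pvClassifyB_eq, h]
          simp only [hc]
          rw [ih]
          simp only [pvHeadsN, h, pvShift, List.map_map, List.nil_append]
          congr 1
          apply List.map_congr_left
          intro p _
          simp only [Function.comp]
          congr 1
          push_cast; ring

theorem pvHeadsN_append (w u : List String) (h : ∀ x ∈ w, pvNH x = true) :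
    pvHeadsN (w ++ u) = pvShift w.length (pvHeadsN u) := by
  induction w with
  | nil => simp [pvShift]
  | cons x w' ih =>
      have hx : pvFoundSection x = none := by
        have := h x (by simp)
        simpa [pvNH, Option.isNone_iff_eq_none] using this
      rw [List.cons_append]
      simp only [pvHeadsN, hx, List.nil_append]
      rw [ih (fun y hy => h y (by simp [hy]))]
      simp only [pvShift, List.map_map, List.length_cons]
      apply List.map_congr_left
      intro p _
      simp only [Function.comp, Prod.mk.injEq, and_true]
      omega

-- ---------- assembling sections from header positions ----------

def pvAssemble (ls : List String) : List (Nat × String) → List (String × List String)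
  | [] => []
  | (i, s) :: rest =>
    match rest with
    | [] => [(s, ls.drop (i + 1))]
    | (j, _) :: _ => (s, (ls.drop (i + 1)).take (j - (i + 1))) :: pvAssemble ls rest

theorem pvAssemble_shift (x : String) (ls : List String) (hd : List (Nat × String)) :
    pvAssemble (x :: ls) (pvShift 1 hd) = pvAssemble ls hd := by
  induction hd with
  | nil => rfl
  | cons p rest ih =>
      obtain ⟨i, s⟩ := p
      cases rest with
      | nil => simp [pvShift, pvAssemble, List.drop_succ_cons]
      | cons q r =>
          obtain ⟨j, ss⟩ := q
          have harith : j + 1 - (i + 1 + 1) = j - (i + 1) := by omega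
          simp only [pvShift, List.map_cons] at ih ⊢
          simp only [pvAssemble, List.drop_succ_cons, harith]
          refine congrArg (List.cons _) ?_
          exact ih

theorem pvAssemble_prefix (w ls : List String) (hd : List (Nat × String)) :
    pvAssemble (w ++ ls) (pvShift w.length hd) = pvAssemble ls hd := by
  induction w with
  | nil =>
      have h0 : pvShift 0 hd = hd := by
        simp [pvShift]
      simp only [List.length_nil, List.nil_append, h0]
  | cons x w' ih =>
      have hshift : pvShift (x :: w').length hd = pvShift 1 (pvShift w'.length hd) := by
        simp only [pvShift, List.map_map, List.length_cons]
        apply List.map_congr_left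
        intro p _
        simp only [Function.comp, Prod.mk.injEq, and_true]
        omega
      rw [hshift, List.cons_append, pvAssemble_shift, ih]

theorem pvSegs_assemble (ls : List String) :
    pvSegs ls = pvAssemble ls (pvHeadsN ls) := by
  induction ls using pvSegs.induct with
  | case1 => simp [pvSegs]; rfl
  | case2 l t s h ih =>
      have hw : ∀ x ∈ t.takeWhile pvNH, pvNH x = true :=
        fun x hx => List.mem_takeWhile_imp hx
      have ht : t.takeWhile pvNH ++ t.dropWhile pvNH = t := List.takeWhile_append_dropWhile
      have hHt : pvHeadsN t = pvShift (t.takeWhile pvNH).length (pvHeadsN (t.dropWhile pvNH)) := by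
        conv_lhs => rw [← ht]
        exact pvHeadsN_append _ _ hw
      have hH : pvHeadsN (l :: t)
          = (0, s) :: pvShift ((t.takeWhile pvNH).length + 1) (pvHeadsN (t.dropWhile pvNH)) := by
        simp only [pvHeadsN, h, List.cons_append, List.nil_append, hHt]
        refine congrArg (List.cons _) ?_
        simp only [pvShift, List.map_map]
        apply List.map_congr_left
        intro p _
        simp only [Function.comp, Prod.mk.injEq, and_true]
        omega
      have hsegs : pvSegs (l :: t) = (s, t.takeWhile pvNH) :: pvSegs (t.dropWhile pvNH) := by
        rw [pvSegs]; simp [h]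
      rw [hsegs, hH, ih]
      cases hu2 : t.dropWhile pvNH with
      | nil =>
          have hwt : t.takeWhile pvNH = t := by
            conv_rhs => rw [← ht, hu2, List.append_nil]
          have h1 : pvShift ((t.takeWhile pvNH).length + 1) (pvHeadsN []) = [] := by
            simp [pvHeadsN, pvShift]
          rw [h1, hwt]
          simp [pvAssemble, pvHeadsN]
      | cons u0 u' =>
          have hne : t.dropWhile pvNH ≠ [] := by rw [hu2]; simp
          have hnh : pvNH u0 = false := by
            have h2 := List.head_dropWhile_not pvNH hne
            have h3 : (t.dropWhile pvNH).head hne = u0 := by simp [hu2]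
            rwa [h3] at h2
          obtain ⟨s0, hs0⟩ : ∃ s0, pvFoundSection u0 = some s0 := by
            cases hf : pvFoundSection u0 with
            | none => simp [pvNH, hf] at hnh
            | some s0 => exact ⟨s0, rfl⟩
          have hHu : pvHeadsN (u0 :: u') = (0, s0) :: pvShift 1 (pvHeadsN u') := by
            simp [pvHeadsN, hs0]
          rw [hHu]
          have hshift2 : pvShift ((t.takeWhile pvNH).length + 1) ((0, s0) :: pvShift 1 (pvHeadsN u'))
              = ((t.takeWhile pvNH).length + 1, s0)
                :: pvShift ((t.takeWhile pvNH).length + 1) (pvShift 1 (pvHeadsN u')) := by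
            simp [pvShift]
          rw [hshift2]
          -- one step of pvAssemble on the two-headed list
          show _ = (s, ((l :: t).drop (0 + 1)).take
              ((t.takeWhile pvNH).length + 1 - (0 + 1)))
            :: pvAssemble (l :: t) (((t.takeWhile pvNH).length + 1, s0)
                :: pvShift ((t.takeWhile pvNH).length + 1) (pvShift 1 (pvHeadsN u')))
          refine congrArg₂ List.cons ?_ ?_
          · -- the first section's content is the run before the next header
            have htake : t.take (t.takeWhile pvNH).length = t.takeWhile pvNH := by
              have h4 := List.take_left (l₁ := t.takeWhile pvNH) (l₂ := t.dropWhile pvNH)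
              rwa [ht] at h4
            simp [htake]
          · -- the remaining sections: strip the (l :: takeWhile) prefix
            have hcons : ((t.takeWhile pvNH).length + 1, s0)
                :: pvShift ((t.takeWhile pvNH).length + 1) (pvShift 1 (pvHeadsN u'))
                = pvShift (l :: t.takeWhile pvNH).length (pvHeadsN (u0 :: u')) := by
              rw [hHu]
              simp only [pvShift, List.map_cons, List.map_map, List.length_cons]
              refine congrArg₂ List.cons (by simp) ?_
              apply List.map_congr_left
              intro p _
              simp only [Function.comp]
            have hsplit : l :: t = (l :: t.takeWhile pvNH) ++ (u0 :: u') := by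
              rw [List.cons_append, ← hu2, ht]
            rw [hcons, hsplit, pvAssemble_prefix, ← hHu]
  | case3 l t h ih =>
      have hsegs : pvSegs (l :: t) = pvSegs t := by
        rw [pvSegs]; simp [h]
      have hH : pvHeadsN (l :: t) = pvShift 1 (pvHeadsN t) := by
        simp [pvHeadsN, h]
      rw [hsegs, hH, pvAssemble_shift, ih]

-- pvAssemble as consecutive-pairs slices plus a final drop
theorem pvAssemble_pairs (ls : List String) (h0 : Nat × String) (hr : List (Nat × String)) :
    pvAssemble ls (h0 :: hr) =
      (((h0 :: hr).zip hr).map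
        (fun pq => (pq.1.2, (ls.drop (pq.1.1 + 1)).take (pq.2.1 - (pq.1.1 + 1)))))
      ++ [(((h0 :: hr).getLast (by simp)).2, ls.drop (((h0 :: hr).getLast (by simp)).1 + 1))] := by
  induction hr generalizing h0 with
  | nil =>
      obtain ⟨i, s⟩ := h0
      simp [pvAssemble]
  | cons h1 hr' ih =>
      obtain ⟨i, s⟩ := h0
      obtain ⟨j, ss⟩ := h1
      have hstep : pvAssemble ls ((i, s) :: (j, ss) :: hr')
          = (s, (ls.drop (i + 1)).take (j - (i + 1))) :: pvAssemble ls ((j, ss) :: hr') := rfl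
      rw [hstep, ih]
      simp only [List.zip_cons_cons, List.map_cons, List.cons_append]
      simp [List.getLast_cons]

theorem pvSliceNat (ls : List String) (i j : Nat) :
    PySem.List.slice ls (some ((i : Int) + 1)) (some ((j : Int)))
      = (ls.drop (i + 1)).take (j - (i + 1)) := by
  have h : ((i : Int) + 1) = (((i + 1 : Nat)) : Int) := by omega
  rw [h, PySem.List.slice_natCast]

theorem pvSliceFromNat (ls : List String) (i : Nat) :
    PySem.List.slice ls (some ((i : Int) + 1)) none = ls.drop (i + 1) := by
  have h : ((i : Int) + 1) = (((i + 1 : Nat)) : Int) := by omega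
  rw [h, PySem.List.slice_from_natCast]

-- ===== VERDICT (by name: the statement is the Claim_ definition above) =====
theorem identify_sections_spec : Claim_equal_identify_sections := by
  intro text _
  unfold Spec_identify_sections identify_sections identify_sections_alt
  dsimp only
  rw [pvFoldA_filter]
  rw [show ((PySem.Dict.empty : PySem.Dict String (List String)), (none : Option String),
        ([] : List String)) = pvAbs [] from rfl, pvFoldCommute]
  set ls := (((PySem.Str.split? text "\n").getD []).map
      (fun raw => PySem.Str.lower (PySem.Str.strip raw))).filter (fun l => l ≠ "") with hls
  have hR : ls.foldl pvStepB [] = (pvSegs ls).reverse := by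
    rw [← pvStepB_segs ls, List.reverse_reverse]
  rw [hR, pvSegs_assemble, pvHeads_fold ls 0 [], List.nil_append]
  have hmap0 : (pvHeadsN ls).map (fun p => ((0 + (p.1 : Int)), p.2))
      = (pvHeadsN ls).map (fun p => ((p.1 : Int), p.2)) := by
    apply List.map_congr_left; intro p _; simp
  rw [hmap0]
  cases hhd : pvHeadsN ls with
  | nil => simp [pvAssemble, pvAbs]
  | cons h0 hr =>
      rw [pvAssemble_pairs]
      rw [List.reverse_append, List.reverse_cons, List.reverse_nil, List.nil_append,
        List.cons_append]
      have hAbs : ∀ (a : String × List String) rest,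
          pvAbs (a :: rest) = (pvDictOf rest.reverse, some a.1, a.2) := by
        intro a rest; obtain ⟨x, y⟩ := a; rfl
      rw [List.nil_append, hAbs]
      simp only [List.reverse_reverse]
      -- B side: heads[1:] is the tail
      have h1 : (1 : Int) = ((1 : Nat) : Int) := by norm_num
      have hdrop1 : PySem.List.slice ((h0 :: hr).map (fun p => ((p.1 : Int), p.2))) (some 1) none
          = hr.map (fun p => ((p.1 : Int), p.2)) := by
        rw [h1, PySem.List.slice_from_natCast]
        simp
      rw [hdrop1, List.zip_map, List.foldl_map, List.getLast?_map,
        List.getLast?_eq_some_getLast (l := h0 :: hr) (by simp)]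
      simp only [Option.map_some]
      -- both dictionaries are the same fold over the Nat-indexed zip
      have hdict : ((h0 :: hr).zip hr).foldl
            (fun (d : PySem.Dict String (List String)) pq =>
              d.insert (Prod.map (fun p => ((p.1 : Int), p.2)) (fun p => ((p.1 : Int), p.2)) pq).1.2
                (PySem.List.slice ls
                  (some ((Prod.map (fun p => ((p.1 : Int), p.2)) (fun p => ((p.1 : Int), p.2)) pq).1.1 + 1))
                  (some (Prod.map (fun p => ((p.1 : Int), p.2)) (fun p => ((p.1 : Int), p.2)) pq).2.1)))
            PySem.Dict.empty
          = pvDictOf (((h0 :: hr).zip hr).map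
              (fun pq => (pq.1.2, (ls.drop (pq.1.1 + 1)).take (pq.2.1 - (pq.1.1 + 1))))) := by
        unfold pvDictOf
        rw [List.foldl_map]
        apply PySem.List.foldl_congr_mem
        intro d pq _
        obtain ⟨⟨i, sc⟩, ⟨j, sc'⟩⟩ := pq
        simp only [Prod.map]
        rw [pvSliceNat]
      rw [hdict, pvSliceFromNat]
      cases List.drop (((h0 :: hr).getLast (by simp)).1 + 1) ls with
      | nil => simp
      | cons a as => simp
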